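-- pv_equiv track=rewrite | github.com/Rainbow-Dreamer/musicpy | musicpy/algorithms.py | find_continuous
-- ===== SOURCE A (Python) =====
-- def find_continuous(current_chord, value, start=None, stop=None):
--     if start is None:
--         start = 0
--     if stop is None:
--         stop = len(current_chord)
--     inds = []
--     appear = False
--     for i in range(start, stop):
--         if not appear:
--             if current_chord[i] == value:
--                 appear = True
--                 inds.append(i)
--         else:
--             if current_chord[i] == value:
--                 inds.append(i)
--             else:
--                 break
--     return inds
-- ===== SOURCE B (Python) =====
-- def find_continuous(current_chord, value, start=None, stop=None):
--     if start is None: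
--         start = 0
--     if stop is None:
--         stop = len(current_chord)
--     matches = [i for i in range(start, stop) if current_chord[i] == value]
--     if not matches:
--         return []
--     return [m for j, m in enumerate(matches) if m == matches[0] + j]
-- ===== Notes on version B (the rewrite author's own statement) =====
-- stated objective: alternative
-- what changed: Instead of one flag-driven scan with break, B first filters all matching indices in [start, stop) into a list, then extracts the first contiguous run arithmetically: it keeps exactly the matches m at position j with m == matches[0] + j, correct because the match list is strictly increasing so equality holds precisely on the consecutive prefix.
-- outside the precondition, e.g. on find_continuous([1, 2], 1, 0, 5): A returns [0], B raises IndexError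
import Mathlib
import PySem

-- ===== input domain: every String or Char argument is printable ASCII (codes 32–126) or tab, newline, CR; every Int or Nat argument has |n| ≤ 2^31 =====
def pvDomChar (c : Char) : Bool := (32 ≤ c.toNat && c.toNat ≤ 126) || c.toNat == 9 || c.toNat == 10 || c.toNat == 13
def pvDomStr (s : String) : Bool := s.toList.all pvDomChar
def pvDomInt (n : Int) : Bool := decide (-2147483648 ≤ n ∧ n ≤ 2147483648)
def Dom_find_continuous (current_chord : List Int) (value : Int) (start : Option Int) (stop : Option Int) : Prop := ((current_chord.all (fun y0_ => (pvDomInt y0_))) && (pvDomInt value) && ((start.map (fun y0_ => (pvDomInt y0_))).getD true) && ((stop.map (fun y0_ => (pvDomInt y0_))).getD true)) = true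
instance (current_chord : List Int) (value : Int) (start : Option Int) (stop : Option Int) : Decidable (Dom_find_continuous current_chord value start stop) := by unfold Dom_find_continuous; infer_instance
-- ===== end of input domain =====

-- B drops A's flag-and-break scan: it filters ALL matching indices in [start, stop) and then
-- keeps exactly those whose value equals first_match + position (an arithmetic characterisation
-- of the first contiguous run, valid since the match list is strictly increasing). Objective: alternative.


-- ===== PORT A =====
-- A's for-loop over range(start, stop) with the 'appear' flag and break, as structural
-- recursion over PySem.List.pyRange start stop 1 (break = stop recursing);
-- current_chord[i] is PySem.List.pyGetD (in range under Pre_).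
def pvGoA (xs : List Int) (v : Int) : List Int → List Int → Bool → List Int
  | [], inds, _ => inds
  | i :: rest, inds, appear =>
    if appear = false then
      if PySem.List.pyGetD xs i 0 = v then pvGoA xs v rest (inds ++ [i]) true
      else pvGoA xs v rest inds false
    else
      if PySem.List.pyGetD xs i 0 = v then pvGoA xs v rest (inds ++ [i]) true
      else inds

def find_continuous (current_chord : List Int) (value : Int) (start : Option Int) (stop : Option Int) : List Int :=
  let s := start.getD 0
  let e := stop.getD (current_chord.length : Int)
  pvGoA current_chord value (PySem.List.pyRange s e 1) [] false

-- ===== PORT B =====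
-- 'enumerate(matches)' transliterated: pairs (index, element) with a running counter.
def pvEnumFrom (j : Nat) : List Int → List (Nat × Int)
  | [] => []
  | x :: xs => (j, x) :: pvEnumFrom (j + 1) xs

def find_continuous_alt (current_chord : List Int) (value : Int) (start : Option Int) (stop : Option Int) : List Int :=
  let s := start.getD 0
  let e := stop.getD (current_chord.length : Int)
  let ms := (PySem.List.pyRange s e 1).filter
    (fun i => decide (PySem.List.pyGetD current_chord i 0 = value))
  match ms with
  | [] => []
  | m0 :: _ =>
    ((pvEnumFrom 0 ms).filter (fun p => decide (p.2 = m0 + (p.1 : Int)))).map (fun p => p.2)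

-- ===== PRECONDITION & SPEC =====
-- Pre_ excludes start/stop settings that let the loop index outside [-len, len) (Python
-- IndexError); it is stated conservatively (sufficient bounds on start/stop), since whether
-- A actually raises can also depend on the data values (an early break may avoid the bad index).
def Pre_find_continuous (current_chord : List Int) (value : Int) (start : Option Int) (stop : Option Int) : Prop :=
  stop.getD (current_chord.length : Int) ≤ start.getD 0 ∨
    (-(current_chord.length : Int) ≤ start.getD 0 ∧
      stop.getD (current_chord.length : Int) ≤ (current_chord.length : Int))
instance (current_chord : List Int) (value : Int) (start : Option Int) (stop : Option Int) : Decidable (Pre_find_continuous current_chord value start stop) := by unfold Pre_find_continuous; infer_instance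

def pvWitness_find_continuous : List Int × Int × Option Int × Option Int := ([3, 5, 5, 2], 5, some 1, none)

def Spec_find_continuous (current_chord : List Int) (value : Int) (start : Option Int) (stop : Option Int) (out : List Int) : Prop := out = find_continuous_alt current_chord value start stop
instance (current_chord : List Int) (value : Int) (start : Option Int) (stop : Option Int) (out : List Int) : Decidable (Spec_find_continuous current_chord value start stop out) := by unfold Spec_find_continuous; infer_instance

-- ===== CLAIM =====
def Claim_equal_find_continuous : Prop := ∀ (current_chord : List Int) (value : Int) (start : Option Int) (stop : Option Int), Dom_find_continuous current_chord value start stop → Pre_find_continuous current_chord value start stop → Spec_find_continuous current_chord value start stop (find_continuous current_chord value start stop)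

-- ===== LEMMAS AND PROOFS =====
-- Common description of the first contiguous run: pvTakeW = run while matching,
-- pvFirstRun = skip to the first match then pvTakeW. Both sides are reduced to these.
def pvTakeW (xs : List Int) (v : Int) : Int → Nat → List Int
  | _, 0 => []
  | i, n + 1 => if PySem.List.pyGetD xs i 0 = v then i :: pvTakeW xs v (i + 1) n else []

def pvFirstRun (xs : List Int) (v : Int) : Int → Nat → List Int
  | _, 0 => []
  | i, n + 1 =>
    if PySem.List.pyGetD xs i 0 = v then i :: pvTakeW xs v (i + 1) n
    else pvFirstRun xs v (i + 1) n

-- A with the flag set is pvTakeW.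
theorem goA_true (xs : List Int) (v : Int) (e : Int) (n : Nat) :
    ∀ (i : Int) (inds : List Int), (e - i).toNat = n →
      pvGoA xs v (PySem.List.pyRange i e 1) inds true = inds ++ pvTakeW xs v i n := by
  induction n with
  | zero =>
    intro i inds h
    rw [PySem.List.pyRange_one_eq_nil (by omega)]
    simp [pvGoA, pvTakeW]
  | succ n ih =>
    intro i inds h
    have hlt : i < e := by omega
    rw [PySem.List.pyRange_one_cons hlt]
    by_cases hv : PySem.List.pyGetD xs i 0 = v
    · simp only [pvGoA, pvTakeW, hv, if_pos]
      rw [ih (i + 1) (inds ++ [i]) (by omega)]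
      simp
    · simp [pvGoA, pvTakeW, hv]

-- A with the flag unset is pvFirstRun.
theorem goA_false (xs : List Int) (v : Int) (e : Int) (n : Nat) :
    ∀ (i : Int) (inds : List Int), (e - i).toNat = n →
      pvGoA xs v (PySem.List.pyRange i e 1) inds false = inds ++ pvFirstRun xs v i n := by
  induction n with
  | zero =>
    intro i inds h
    rw [PySem.List.pyRange_one_eq_nil (by omega)]
    simp [pvGoA, pvFirstRun]
  | succ n ih =>
    intro i inds h
    have hlt : i < e := by omega
    rw [PySem.List.pyRange_one_cons hlt]
    by_cases hv : PySem.List.pyGetD xs i 0 = v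
    · simp only [pvGoA, pvFirstRun, hv, if_pos]
      rw [goA_true xs v e n (i + 1) (inds ++ [i]) (by omega)]
      simp
    · simp only [pvGoA, pvFirstRun, hv, reduceIte]
      exact ih (i + 1) inds (by omega)

-- Once the arithmetic test m = c0 + j has failed, it fails forever (matches are strictly increasing).
theorem enumFilter_broken (xs : List Int) (v : Int) (e c0 : Int) (n : Nat) :
    ∀ (c : Int) (j : Nat), (e - c).toNat = n → c0 + (j : Int) < c →
      ((pvEnumFrom j ((PySem.List.pyRange c e 1).filter
          (fun i => decide (PySem.List.pyGetD xs i 0 = v)))).filter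
        (fun p => decide (p.2 = c0 + (p.1 : Int)))).map (fun p => p.2) = [] := by
  induction n with
  | zero =>
    intro c j h _
    rw [PySem.List.pyRange_one_eq_nil (by omega)]
    simp [pvEnumFrom]
  | succ n ih =>
    intro c j h hlt
    have hce : c < e := by omega
    rw [PySem.List.pyRange_one_cons hce]
    by_cases hv : PySem.List.pyGetD xs c 0 = v
    · simp only [List.filter_cons, hv, decide_true, pvEnumFrom, if_pos]
      have hne : ¬ (c = c0 + (j : Int)) := by omega
      simp only [decide_eq_true_eq, hne, reduceIte]
      exact ih (c + 1) (j + 1) (by omega) (by push_cast; omega)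
    · simp only [List.filter_cons, hv, decide_false, Bool.false_eq_true, reduceIte]
      exact ih (c + 1) j (by omega) (by omega)

-- While c = c0 + j, the enumerate-filter keeps exactly the matching run: it is pvTakeW.
theorem enumFilter_run (xs : List Int) (v : Int) (e c0 : Int) (n : Nat) :
    ∀ (j : Nat), (e - (c0 + (j : Int))).toNat = n →
      ((pvEnumFrom j ((PySem.List.pyRange (c0 + (j : Int)) e 1).filter
          (fun i => decide (PySem.List.pyGetD xs i 0 = v)))).filter
        (fun p => decide (p.2 = c0 + (p.1 : Int)))).map (fun p => p.2) =
      pvTakeW xs v (c0 + (j : Int)) n := by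
  induction n with
  | zero =>
    intro j h
    rw [PySem.List.pyRange_one_eq_nil (by omega)]
    simp [pvEnumFrom, pvTakeW]
  | succ n ih =>
    intro j h
    have hce : c0 + (j : Int) < e := by omega
    rw [PySem.List.pyRange_one_cons hce]
    by_cases hv : PySem.List.pyGetD xs (c0 + (j : Int)) 0 = v
    · simp only [List.filter_cons, hv, decide_true, pvEnumFrom, if_pos]
      simp only [List.map_cons]
      have h2 := ih (j + 1) (by push_cast; omega)
      push_cast at h2
      rw [show c0 + ((j : Int)) + 1 = c0 + ((j : Int) + 1) by ring, h2]
      simp only [pvTakeW, hv, if_pos]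
      rw [show c0 + ((j : Int) + 1) = c0 + (j : Int) + 1 by ring]
    · simp only [List.filter_cons, hv, decide_false, Bool.false_eq_true, reduceIte]
      rw [enumFilter_broken xs v e c0 n (c0 + (j : Int) + 1) j (by omega) (by omega)]
      simp [pvTakeW, hv]

-- B's whole body is pvFirstRun.
theorem alt_eq_firstRun (xs : List Int) (v : Int) (e : Int) (n : Nat) :
    ∀ (i : Int), (e - i).toNat = n →
      (match (PySem.List.pyRange i e 1).filter
          (fun k => decide (PySem.List.pyGetD xs k 0 = v)) with
        | [] => ([] : List Int)
        | m0 :: _ =>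
          ((pvEnumFrom 0 ((PySem.List.pyRange i e 1).filter
              (fun k => decide (PySem.List.pyGetD xs k 0 = v)))).filter
            (fun p => decide (p.2 = m0 + (p.1 : Int)))).map (fun p => p.2)) =
      pvFirstRun xs v i n := by
  induction n with
  | zero =>
    intro i h
    rw [PySem.List.pyRange_one_eq_nil (by omega)]
    simp [pvFirstRun]
  | succ n ih =>
    intro i h
    have hlt : i < e := by omega
    rw [PySem.List.pyRange_one_cons hlt]
    by_cases hv : PySem.List.pyGetD xs i 0 = v
    · simp only [List.filter_cons, hv, decide_true, if_pos, pvEnumFrom]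
      simp only [decide_eq_true_eq, Nat.cast_zero, add_zero, if_pos, List.map_cons]
      have h2 := enumFilter_run xs v e i n 1 (by push_cast; omega)
      push_cast at h2
      rw [h2]
      simp [pvFirstRun, hv]
    · simp only [List.filter_cons, hv, decide_false, Bool.false_eq_true, reduceIte]
      rw [ih (i + 1) (by omega)]
      simp [pvFirstRun, hv]

-- ===== VERDICT =====
theorem find_continuous_spec : Claim_equal_find_continuous := by
  intro current_chord value start stop _ _
  unfold Spec_find_continuous find_continuous find_continuous_alt
  rw [goA_false current_chord value _ _ _ _ rfl]
  rw [alt_eq_firstRun current_chord value _ _ _ rfl]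
  simp
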